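-- pv_equiv track=rewrite | github.com/rawg/levis | levis/crossover.py | uniform_bin
-- ===== SOURCE A (Python) =====
-- def uniform_bin(parent1, parent2, bits):
--     """Return a new chromosome using uniform crossover on a binary string.
--
--     This is suitable for binary encoding.
--
--     Args:
--         parent1 (int): A parent chromosome.
--         parent2 (int): A parent chromosome.
--         bits (int): The number of bits used in the encoding.
--
--     Returns:
--         Tuple[List]: A new chromosome descended from the given parents.
--     """
--     child1 = 0
--     child2 = 0
--
--     for locus in range(0, bits):
--         mask = 2 ** locus
--         child1 = mask & parent1 | child1
--         child2 = mask & parent2 | child2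
--         parent1, parent2 = parent2, parent1
--
--     return [child1, child2]
-- ===== SOURCE B (Python) =====
-- def uniform_bin(parent1, parent2, bits):
--     """Uniform binary crossover via precomputed even/odd position masks.
--
--     child1 takes parent1's bits at even loci and parent2's at odd loci
--     (child2 the reverse), combined with a constant number of big-int
--     mask operations instead of one masking step per bit.
--     """
--     if bits <= 0:
--         return [0, 0]
--     even = (4 ** ((bits + 1) // 2) - 1) // 3      # bits 0,2,4,... below `bits`
--     odd = ((1 << bits) - 1) ^ even                # bits 1,3,5,... below `bits`
--     return [(parent1 & even) | (parent2 & odd),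
--             (parent2 & even) | (parent1 & odd)]
-- ===== Notes on version B (the rewrite author's own statement) =====
-- stated objective: faster
-- what changed: Replaces A's per-locus loop (one power-of-two mask, two ANDs/ORs and a parent swap per bit) with two precomputed even/odd position bitmasks combined into each child by a constant number of big-int mask operations.
import Mathlib
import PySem

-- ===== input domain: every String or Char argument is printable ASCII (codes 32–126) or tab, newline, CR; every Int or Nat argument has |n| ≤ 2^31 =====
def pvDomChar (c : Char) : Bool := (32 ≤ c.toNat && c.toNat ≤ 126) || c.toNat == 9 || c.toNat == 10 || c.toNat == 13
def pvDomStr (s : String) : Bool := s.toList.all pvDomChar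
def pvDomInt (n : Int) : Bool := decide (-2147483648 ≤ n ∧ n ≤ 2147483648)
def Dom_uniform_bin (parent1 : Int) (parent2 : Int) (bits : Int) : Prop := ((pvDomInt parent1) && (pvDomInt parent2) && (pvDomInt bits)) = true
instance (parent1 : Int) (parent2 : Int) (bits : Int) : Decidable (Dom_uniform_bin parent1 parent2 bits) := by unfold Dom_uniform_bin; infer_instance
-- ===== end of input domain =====

-- B replaces A's per-bit loop (one mask-and-or per locus, with the parents swapped
-- each step) by two precomputed even/odd position bitmasks combined with a constant
-- number of bitwise operations; proved to return the same pair for all inputs.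


-- ===== PORT A =====
-- one iteration of A's `for locus in range(0, bits)` body over the state
-- (child1, child2, parent1, parent2)
def ubStep (st : Int × Int × Int × Int) (locus : Int) : Int × Int × Int × Int :=
  let mask : Int := (2 : Int) ^ locus.toNat          -- 2 ** locus (locus ≥ 0 in range(0, bits))
  (PySem.Int.bor (PySem.Int.band mask st.2.2.1) st.1,
   PySem.Int.bor (PySem.Int.band mask st.2.2.2) st.2.1,
   st.2.2.2, st.2.2.1)

def uniform_bin (parent1 : Int) (parent2 : Int) (bits : Int) : List Int :=
  let st := (PySem.List.pyRange 0 bits 1).foldl ubStep (0, 0, parent1, parent2)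
  [st.1, st.2.1]

-- ===== PORT B =====
def uniform_bin_alt (parent1 : Int) (parent2 : Int) (bits : Int) : List Int :=
  if bits ≤ 0 then [0, 0]
  else
    -- even = (4 ** ((bits + 1) // 2) - 1) // 3 ; odd = ((1 << bits) - 1) ^ even
    let even : Int := PySem.Int.floordiv ((4 : Int) ^ (PySem.Int.floordiv (bits + 1) 2).toNat - 1) 3
    let odd : Int := PySem.Int.bxor (((1 : Int) <<< bits.toNat) - 1) even
    [PySem.Int.bor (PySem.Int.band parent1 even) (PySem.Int.band parent2 odd),
     PySem.Int.bor (PySem.Int.band parent2 even) (PySem.Int.band parent1 odd)]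

-- ===== PRECONDITION & SPEC =====
def Spec_uniform_bin (parent1 : Int) (parent2 : Int) (bits : Int) (out : List Int) : Prop := out = uniform_bin_alt parent1 parent2 bits
instance (parent1 : Int) (parent2 : Int) (bits : Int) (out : List Int) : Decidable (Spec_uniform_bin parent1 parent2 bits out) := by unfold Spec_uniform_bin; infer_instance

-- ===== CLAIM (what is proved, stated in full; the proofs are below) =====
def Claim_equal_uniform_bin : Prop := ∀ (parent1 : Int) (parent2 : Int) (bits : Int), Dom_uniform_bin parent1 parent2 bits → Spec_uniform_bin parent1 parent2 bits (uniform_bin parent1 parent2 bits)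

-- ===== LEMMAS AND PROOFS =====

-- bit k of the Python integer p (infinite two's complement)
def pbit (p : Int) (k : Nat) : Bool :=
  if 0 ≤ p then p.toNat.testBit k else !((-p - 1).toNat.testBit k)

-- the Nat value of p & m for a nonnegative mask m
def fm (p : Int) (m : Nat) : Nat :=
  if 0 ≤ p then p.toNat &&& m else m - (m &&& (-p - 1).toNat)

lemma or_eq_add (a : Nat) : ∀ b : Nat, a &&& b = 0 → a ||| b = a + b := by
  induction a using Nat.strong_induction_on with
  | _ a ih =>
    intro b h
    rcases Nat.eq_zero_or_pos a with ha | ha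
    · subst ha; simp
    · have h2 : a / 2 &&& b / 2 = 0 := by rw [← Nat.and_div_two, h, Nat.zero_div]
      have ih2 := ih (a / 2) (Nat.div_lt_self ha (by norm_num)) (b / 2) h2
      have hb0 : (a &&& b).testBit 0 = false := by rw [h]; exact Nat.zero_testBit 0
      rw [Nat.testBit_and] at hb0
      have hm : (a ||| b).testBit 0 = (a.testBit 0 || b.testBit 0) := Nat.testBit_or ..
      simp only [Nat.testBit_zero, Bool.and_eq_false_iff,
        decide_eq_false_iff_not] at hb0
      have hd : (a ||| b) / 2 = a / 2 ||| b / 2 := Nat.or_div_two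
      have hx := Nat.div_add_mod (a ||| b) 2
      have hxa := Nat.div_add_mod a 2
      have hxb := Nat.div_add_mod b 2
      rw [hd, ih2] at hx
      have hb' : decide ((a ||| b) % 2 = 1) = (decide (a % 2 = 1) || decide (b % 2 = 1)) := by
        simpa only [Nat.testBit_zero] using hm
      have hm2 : (a ||| b) % 2 = 1 ↔ (a % 2 = 1 ∨ b % 2 = 1) := by
        constructor
        · intro hh
          rcases Bool.or_eq_true_iff.mp (by rw [← hb', decide_eq_true_eq]; exact hh) with h' | h'
          · exact Or.inl (of_decide_eq_true h')
          · exact Or.inr (of_decide_eq_true h')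
        · intro hh
          apply of_decide_eq_true
          rw [hb']
          rcases hh with h' | h' <;> simp [h']
      omega

lemma and_two_pow_eq_zero {a n : Nat} (h : a < 2 ^ n) : 2 ^ n &&& a = 0 := by
  apply Nat.eq_of_testBit_eq
  intro k
  rw [Nat.testBit_and, Nat.testBit_two_pow]
  rcases eq_or_ne n k with rfl | hk
  · simp [Nat.testBit_lt_two_pow h]
  · simp [hk]

lemma band_mask_nat (p : Int) (m : Nat) : PySem.Int.band p (m : Int) = (fm p m : Int) := by
  unfold PySem.Int.band fm
  by_cases hp : 0 ≤ p <;> simp [hp]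

lemma testBit_fm (p : Int) (m k : Nat) : (fm p m).testBit k = (m.testBit k && pbit p k) := by
  unfold fm pbit
  by_cases hp : 0 ≤ p
  · simp [hp, Nat.testBit_and, Bool.and_comm]
  · simp only [hp, if_false]
    set m' : Nat := (-p - 1).toNat with hm'
    have hsub : m &&& m' &&& (m ^^^ (m &&& m')) = 0 := by
      apply Nat.eq_of_testBit_eq
      intro i
      simp only [Nat.testBit_and, Nat.testBit_xor, Nat.zero_testBit]
      cases m.testBit i <;> cases m'.testBit i <;> rfl
    have hor : (m &&& m') ||| (m ^^^ (m &&& m')) = m := by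
      apply Nat.eq_of_testBit_eq
      intro i
      simp only [Nat.testBit_or, Nat.testBit_and, Nat.testBit_xor]
      cases m.testBit i <;> cases m'.testBit i <;> rfl
    have hadd := or_eq_add (m &&& m') (m ^^^ (m &&& m')) hsub
    have heq : m - (m &&& m') = m ^^^ (m &&& m') := by omega
    rw [heq, Nat.testBit_xor, Nat.testBit_and]
    cases m.testBit k <;> cases m'.testBit k <;> rfl

lemma band_pow (p : Int) (k : Nat) :
    PySem.Int.band ((2 : Int) ^ k) p = ((if pbit p k then 2 ^ k else 0 : Nat) : Int) := by
  rw [PySem.Int.band_comm]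
  have h2 : ((2 : Int) ^ k) = ((2 ^ k : Nat) : Int) := by push_cast; ring
  rw [h2, band_mask_nat]
  congr 1
  apply Nat.eq_of_testBit_eq
  intro i
  rw [testBit_fm, Nat.testBit_two_pow]
  rcases eq_or_ne k i with rfl | hk
  · cases hpb : pbit p k <;> simp [Nat.zero_testBit]
  · cases hpb : pbit p k <;> simp [hk, Nat.zero_testBit]

-- A's accumulated child value after the first n loci, as a Nat (p feeds even loci, q odd ones)
def acc (p q : Int) : Nat → Nat
  | 0 => 0
  | n + 1 => (if pbit (if n % 2 = 0 then p else q) n then 2 ^ n else 0) ||| acc p q n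

lemma testBit_term (c : Int) (n k : Nat) (hkn : k ≠ n) :
    (if pbit c n then 2 ^ n else 0 : Nat).testBit k = false := by
  split
  · rw [Nat.testBit_two_pow]; simp [Ne.symm hkn]
  · exact Nat.zero_testBit k

lemma testBit_term_self (c : Int) (k : Nat) :
    (if pbit c k then 2 ^ k else 0 : Nat).testBit k = pbit c k := by
  cases h : pbit c k <;> simp [Nat.zero_testBit]

lemma testBit_acc (p q : Int) (n k : Nat) :
    (acc p q n).testBit k = if k < n then pbit (if k % 2 = 0 then p else q) k else false := by
  induction n with
  | zero => simp [acc]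
  | succ n ih =>
    rw [acc, Nat.testBit_or, ih]
    rcases Nat.lt_trichotomy k n with hk | rfl | hk
    · rw [testBit_term (if n % 2 = 0 then p else q) n k (by omega)]
      simp [hk, Nat.lt_succ_of_lt hk]
    · rw [testBit_term_self]
      simp
    · rw [testBit_term (if n % 2 = 0 then p else q) n k (by omega)]
      simp [show ¬ k < n by omega, show ¬ k < n + 1 by omega]

-- A's fold over range(0, n) in closed state form
lemma foldA (p q : Int) (n : Nat) :
    (PySem.List.pyRange 0 (n : Int) 1).foldl ubStep (0, 0, p, q) =
      ((acc p q n : Int), (acc q p n : Int),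
       if n % 2 = 0 then p else q, if n % 2 = 0 then q else p) := by
  induction n with
  | zero => simp [PySem.List.pyRange, acc]
  | succ n ih =>
    have hcast : ((n + 1 : Nat) : Int) = (n : Int) + 1 := by push_cast; ring
    rw [hcast, PySem.List.pyRange_one_succ_right (by positivity), List.foldl_append, ih]
    simp only [List.foldl_cons, List.foldl_nil]
    unfold ubStep
    simp only [Int.toNat_natCast]
    rw [band_pow, band_pow, PySem.Int.bor_natCast, PySem.Int.bor_natCast]
    simp only [Prod.mk.injEq]
    refine ⟨?_, ?_, ?_, ?_⟩
    · rw [show acc p q (n + 1) = (if pbit (if n % 2 = 0 then p else q) n then 2 ^ n else 0) ||| acc p q n from rfl]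
    · rw [show acc q p (n + 1) = (if pbit (if n % 2 = 0 then q else p) n then 2 ^ n else 0) ||| acc q p n from rfl]
    · rcases Nat.mod_two_eq_zero_or_one n with h | h <;>
        · have h' : (n + 1) % 2 ≠ n % 2 := by omega
          simp [h, show ((n + 1) % 2 = 0) = (¬ n % 2 = 0) by simp; omega]
    · rcases Nat.mod_two_eq_zero_or_one n with h | h <;>
        · simp [h, show ((n + 1) % 2 = 0) = (¬ n % 2 = 0) by simp; omega]

-- the even-position mask Σ_{k<n, k even} 2^k
def sn : Nat → Nat
  | 0 => 0
  | n + 1 => sn n + (if n % 2 = 0 then 2 ^ n else 0)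

lemma sn_lt (n : Nat) : sn n < 2 ^ n := by
  induction n with
  | zero => simp [sn]
  | succ n ih =>
    have hpow : (2 : Nat) ^ (n + 1) = 2 ^ n * 2 := Nat.pow_succ ..
    rw [sn]
    split <;> omega

lemma testBit_sn (n k : Nat) : (sn n).testBit k = (decide (k < n) && decide (k % 2 = 0)) := by
  induction n with
  | zero => simp [sn]
  | succ n ih =>
    have hdisj : (if n % 2 = 0 then 2 ^ n else 0 : Nat) &&& sn n = 0 := by
      split
      · exact and_two_pow_eq_zero (sn_lt n)
      · simp
    rw [sn, Nat.add_comm, ← or_eq_add _ _ hdisj, Nat.testBit_or, ih]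
    rcases Nat.lt_trichotomy k n with hk | rfl | hk
    · have ht : (if n % 2 = 0 then 2 ^ n else 0 : Nat).testBit k = false := by
        split
        · rw [Nat.testBit_two_pow]; simp; omega
        · exact Nat.zero_testBit k
      simp [ht, hk, Nat.lt_succ_of_lt hk]
    · have ht : (if k % 2 = 0 then 2 ^ k else 0 : Nat).testBit k = decide (k % 2 = 0) := by
        split <;> simp [Nat.zero_testBit, *]
      simp [ht]
    · have ht : (if n % 2 = 0 then 2 ^ n else 0 : Nat).testBit k = false := by
        split
        · rw [Nat.testBit_two_pow]; simp; omega
        · exact Nat.zero_testBit k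
      simp [ht, show ¬ k < n by omega, show ¬ k < n + 1 by omega]

lemma three_mul_sn (n : Nat) : 3 * sn n = 4 ^ ((n + 1) / 2) - 1 := by
  induction n with
  | zero => simp [sn]
  | succ n ih =>
    rcases Nat.mod_two_eq_zero_or_one n with h | h
    · have hdiv1 : (n + 1) / 2 = n / 2 := by omega
      have hdiv2 : (n + 2) / 2 = n / 2 + 1 := by omega
      have hpow : (4 : Nat) ^ (n / 2) = 2 ^ n := by
        rw [show (4 : Nat) = 2 ^ 2 from rfl, ← Nat.pow_mul]
        congr 1; omega
      have hpos : 1 ≤ (4 : Nat) ^ (n / 2) := Nat.one_le_pow _ _ (by norm_num)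
      rw [sn, h, if_pos rfl, hdiv2, Nat.pow_succ]
      rw [hdiv1, hpow] at ih
      have h2 : (1 : Nat) ≤ 2 ^ n := Nat.one_le_two_pow
      rw [hpow]
      omega
    · have hdiv : (n + 2) / 2 = (n + 1) / 2 := by omega
      rw [sn, h, if_neg (by omega), hdiv, Nat.add_zero, ih]

lemma sn_closed (n : Nat) : sn n = (4 ^ ((n + 1) / 2) - 1) / 3 := by
  have := three_mul_sn n
  omega

-- B's two children, with the n-bit masks evaluated to Nat form
lemma alt_eval (p q : Int) (bits : Int) (hpos : 0 < bits) :
    uniform_bin_alt p q bits =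
      [((fm p (sn bits.toNat) ||| fm q ((2 ^ bits.toNat - 1) ^^^ sn bits.toNat) : Nat) : Int),
       ((fm q (sn bits.toNat) ||| fm p ((2 ^ bits.toNat - 1) ^^^ sn bits.toNat) : Nat) : Int)] := by
  unfold uniform_bin_alt
  rw [if_neg (by omega)]
  set n : Nat := bits.toNat with hn
  have hbn : bits = (n : Int) := by omega
  have hm : PySem.Int.floordiv (bits + 1) 2 = (((n + 1) / 2 : Nat) : Int) := by
    rw [hbn]
    rw [show ((n : Int) + 1) = ((n + 1 : Nat) : Int) by push_cast; ring]
    exact_mod_cast PySem.Int.floordiv_natCast (n + 1) 2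
  have heven : PySem.Int.floordiv ((4 : Int) ^ (PySem.Int.floordiv (bits + 1) 2).toNat - 1) 3
      = ((sn n : Nat) : Int) := by
    rw [hm, Int.toNat_natCast]
    have h1 : (1 : Nat) ≤ 4 ^ ((n + 1) / 2) := Nat.one_le_pow _ _ (by norm_num)
    rw [show ((4 : Int) ^ ((n + 1) / 2) - 1) = (((4 ^ ((n + 1) / 2) - 1 : Nat) : Int)) by push_cast [h1]; ring]
    rw [show (3 : Int) = ((3 : Nat) : Int) by norm_num]
    rw [PySem.Int.floordiv_natCast, sn_closed]
  have hfull : ((1 : Int) <<< n) - 1 = (((2 ^ n - 1 : Nat) : Int)) := by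
    rw [Int.shiftLeft_eq']
    have h1 : (1 : Nat) ≤ 2 ^ n := Nat.one_le_two_pow
    push_cast [h1]
    ring
  simp only [heven, hfull, PySem.Int.bxor_natCast, band_mask_nat, PySem.Int.bor_natCast]

lemma child_eq (p q : Int) (n : Nat) :
    acc p q n = fm p (sn n) ||| fm q ((2 ^ n - 1) ^^^ sn n) := by
  apply Nat.eq_of_testBit_eq
  intro k
  rw [testBit_acc, Nat.testBit_or, testBit_fm, testBit_fm, Nat.testBit_xor,
      Nat.testBit_two_pow_sub_one, testBit_sn]
  by_cases hk : k < n
  · by_cases he : k % 2 = 0 <;>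
      cases hp : pbit p k <;> cases hq : pbit q k <;> simp [hk, he, hp, hq]
  · simp [hk]

-- ===== VERDICT (by name: the statement is the Claim_ definition above) =====
theorem uniform_bin_spec : Claim_equal_uniform_bin := by
  intro p q bits _
  unfold Spec_uniform_bin
  by_cases hb : bits ≤ 0
  · unfold uniform_bin uniform_bin_alt
    rw [if_pos hb]
    have hemp : PySem.List.pyRange 0 bits 1 = [] := by
      simp [PySem.List.pyRange]; omega
    simp [hemp]
  · have hpos : 0 < bits := by omega
    have hbn : bits = ((bits.toNat : Nat) : Int) := by omega
    unfold uniform_bin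
    rw [alt_eval p q bits hpos]
    conv_lhs => rw [hbn]
    rw [foldA]
    simp only []
    rw [child_eq p q bits.toNat, child_eq q p bits.toNat]
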